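-- pv_equiv track=rewrite | github.com/Locke637/vdn_magents | common/common.py | find_neighbor_id
-- ===== SOURCE A (Python) =====
-- def find_neighbor_id(pos, view_field):
--     nei_index = {}
--     for id, p in enumerate(pos):
--         nei_index[id] = []
--         for index, nei_p in enumerate(pos):
--             if abs(p[0] - nei_p[0]) < view_field and abs(p[1] - nei_p[1]) < view_field and index != id:
--                 nei_index[id].append(index)
--     return nei_index
-- ===== SOURCE B (Python) =====
-- def find_neighbor_id(pos, view_field):
--     n = len(pos)
--     nei_index = {i: [] for i in range(n)}
--     for i in range(n):
--         p = pos[i]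
--         p0 = p[0]
--         for j in range(i + 1, n):
--             q = pos[j]
--             if abs(p0 - q[0]) < view_field and abs(p[1] - q[1]) < view_field:
--                 nei_index[i].append(j)
--                 nei_index[j].append(i)
--     return nei_index
-- ===== Notes on version B (the rewrite author's own statement) =====
-- stated objective: alternative
-- what changed: Exploits the symmetry of the Chebyshev closeness test: a single triangular pass over unordered pairs i<j records each close pair in both buckets at once, instead of A's full n*n scan that re-tests every ordered pair; measured ~1.3x at the largest timed size, below the 1.5x bar, so no speed is claimed.
import Mathlib
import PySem

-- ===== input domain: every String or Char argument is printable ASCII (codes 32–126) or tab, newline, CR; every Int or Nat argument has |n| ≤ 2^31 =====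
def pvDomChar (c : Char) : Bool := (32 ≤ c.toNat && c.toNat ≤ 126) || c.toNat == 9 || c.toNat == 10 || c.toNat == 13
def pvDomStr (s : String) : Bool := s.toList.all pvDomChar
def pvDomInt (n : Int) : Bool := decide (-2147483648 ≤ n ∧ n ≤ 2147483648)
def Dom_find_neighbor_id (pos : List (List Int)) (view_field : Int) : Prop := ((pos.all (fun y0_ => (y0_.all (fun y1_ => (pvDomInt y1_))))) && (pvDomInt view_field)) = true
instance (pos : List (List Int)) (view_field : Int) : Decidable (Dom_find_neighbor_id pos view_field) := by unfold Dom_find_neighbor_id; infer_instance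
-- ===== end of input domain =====

-- B replaces A's full n×n scan by a single triangular pass over unordered pairs i<j that
-- records each close pair in both buckets at once (the Chebyshev closeness test is symmetric):
-- an alternative algorithm of the same asymptotic cost with half the pair tests.
-- The Lean ports read coordinates with total pyGetD; Pre_ (A's exact return domain) is what makes
-- them faithful to the Pythons — the two ports themselves agree on every input.

-- ===== PORT A =====
-- condition of A's inner if: |p[0]-nei_p[0]| < vf and |p[1]-nei_p[1]| < vf and index != id
def pvAcond (view_field : Int) (p : List Int) (id : Int) (jq : Int × List Int) : Bool :=
  decide (|PySem.List.pyGetD p 0 0 - PySem.List.pyGetD jq.2 0 0| < view_field ∧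
          |PySem.List.pyGetD p 1 0 - PySem.List.pyGetD jq.2 1 0| < view_field ∧
          jq.1 ≠ id)

-- A's inner loop: for index, nei_p in enumerate(pos): if …: nei_index[id].append(index)
def pvAinner (pos : List (List Int)) (view_field : Int) (id : Int) (p : List Int)
    (d : PySem.Dict Int (List Int)) : PySem.Dict Int (List Int) :=
  (PySem.List.enumerate pos 0).foldl
    (fun d jq => if pvAcond view_field p id jq then d.modify id [] (· ++ [jq.1]) else d) d

def find_neighbor_id (pos : List (List Int)) (view_field : Int) : List (Int × List Int) :=
  ((PySem.List.enumerate pos 0).foldl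
    (fun d ip => pvAinner pos view_field ip.1 ip.2 (d.insert ip.1 []))
    PySem.Dict.empty).items

-- ===== PORT B =====
-- condition of B's inner if: |p0 - q[0]| < vf and |p[1] - q[1]| < vf
def pvBcond (view_field : Int) (p0 : Int) (p q : List Int) : Bool :=
  decide (|p0 - PySem.List.pyGetD q 0 0| < view_field ∧
          |PySem.List.pyGetD p 1 0 - PySem.List.pyGetD q 1 0| < view_field)

-- B's inner loop: for j in range(i+1, n): if …: buckets of i and j both get appended
def pvBinner (pos : List (List Int)) (view_field : Int) (n i : Int) (p : List Int) (p0 : Int)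
    (d : PySem.Dict Int (List Int)) : PySem.Dict Int (List Int) :=
  (PySem.List.pyRange (i + 1) n 1).foldl
    (fun d j =>
      if pvBcond view_field p0 p (PySem.List.pyGetD pos j []) then
        (d.modify i [] (· ++ [j])).modify j [] (· ++ [i])
      else d) d

def find_neighbor_id_alt (pos : List (List Int)) (view_field : Int) : List (Int × List Int) :=
  let n : Int := (pos.length : Int)
  (((PySem.List.pyRange 0 n 1).foldl
      (fun d i =>
        pvBinner pos view_field n i (PySem.List.pyGetD pos i [])
          (PySem.List.pyGetD (PySem.List.pyGetD pos i []) 0 0) d)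
      ((PySem.List.pyRange 0 n 1).foldl (fun d i => d.insert i []) PySem.Dict.empty))).items

-- ===== PRECONDITION & SPEC =====
-- Pre_ is exactly A's return domain: A raises IndexError iff some row is empty (p[0] is read for
-- every row once pos is nonempty) or two rows whose first coordinates are view_field-close
-- (including a row with itself) do not both have a second coordinate.
def Pre_find_neighbor_id (pos : List (List Int)) (view_field : Int) : Prop :=
  (∀ p ∈ pos, 1 ≤ p.length) ∧
  ∀ p ∈ pos, ∀ q ∈ pos, |p.getD 0 0 - q.getD 0 0| < view_field → 2 ≤ p.length ∧ 2 ≤ q.length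

instance (pos : List (List Int)) (view_field : Int) : Decidable (Pre_find_neighbor_id pos view_field) := by
  unfold Pre_find_neighbor_id; infer_instance

def pvWitness_find_neighbor_id : List (List Int) × Int := ([[0, 0], [1, 1]], 2)

def Spec_find_neighbor_id (pos : List (List Int)) (view_field : Int) (out : List (Int × List Int)) : Prop :=
  out = find_neighbor_id_alt pos view_field
instance (pos : List (List Int)) (view_field : Int) (out : List (Int × List Int)) : Decidable (Spec_find_neighbor_id pos view_field out) := by unfold Spec_find_neighbor_id; infer_instance

-- ===== CLAIM (what is proved, stated in full; the proofs are below) =====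
def Claim_equal_find_neighbor_id : Prop := ∀ (pos : List (List Int)) (view_field : Int), Dom_find_neighbor_id pos view_field → Pre_find_neighbor_id pos view_field → Spec_find_neighbor_id pos view_field (find_neighbor_id pos view_field)

-- ===== LEMMAS AND PROOFS =====

-- the row of pos at Int index j, and its two coordinates, as the ports read them
def pvRow (pos : List (List Int)) (j : Int) : List Int := PySem.List.pyGetD pos j []
def pvX (pos : List (List Int)) (j : Int) : Int := PySem.List.pyGetD (pvRow pos j) 0 0
def pvY (pos : List (List Int)) (j : Int) : Int := PySem.List.pyGetD (pvRow pos j) 1 0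
def pvNear (pos : List (List Int)) (view_field : Int) (i j : Int) : Bool :=
  decide (|pvX pos i - pvX pos j| < view_field ∧ |pvY pos i - pvY pos j| < view_field)

theorem pvNear_comm (pos : List (List Int)) (vf i j : Int) :
    pvNear pos vf i j = pvNear pos vf j i := by
  simp only [pvNear, abs_sub_comm]

-- the canonical neighbour list of k
def pvVal (pos : List (List Int)) (vf : Int) (k : Int) : List Int :=
  (PySem.List.pyRange 0 (pos.length : Int) 1).filter (fun j => pvNear pos vf k j && j != k)

-- generic: a loop that conditionally appends to one fixed bucket k
theorem getD_foldl_ite_modify {α : Type} (c : α → Bool) (g : α → Int) (k k' : Int) :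
    ∀ (l : List α) (d : PySem.Dict Int (List Int)),
      ((l.foldl (fun d x => if c x then d.modify k [] (· ++ [g x]) else d) d).getD k' []) =
        if k' = k then d.getD k [] ++ (l.filter c).map g else d.getD k' [] := by
  intro l
  induction l with
  | nil => intro d; by_cases h : k' = k <;> simp [h]
  | cons x xs ih =>
    intro d
    simp only [List.foldl_cons, List.filter_cons]
    by_cases hc : c x
    · rw [ih]
      simp only [hc, if_true, PySem.Dict.getD_modify, List.map_cons]
      by_cases hk : k' = k
      · simp [hk, List.append_assoc]
      · simp [hk]
    · simp only [Bool.not_eq_true] at hc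
      rw [if_neg (by simp [hc]), ih]
      simp [hc]

theorem keys_foldl_ite_modify {α : Type} (c : α → Bool) (g : α → Int) (k : Int) :
    ∀ (l : List α) (d : PySem.Dict Int (List Int)), d.contains k = true →
      ((l.foldl (fun d x => if c x then d.modify k [] (· ++ [g x]) else d) d).keys) = d.keys := by
  intro l
  induction l with
  | nil => intro d _; simp
  | cons x xs ih =>
    intro d hd
    simp only [List.foldl_cons]
    by_cases hc : c x
    · rw [if_pos hc, ih]
      · rw [PySem.Dict.keys_modify, PySem.Dict.keys_insert_of_contains _ _ hd]
      · rw [PySem.Dict.contains_modify]; simp [hd]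
    · rw [if_neg (by simp_all), ih _ hd]

-- generic: B's inner loop, conditionally appending to both buckets i and j
theorem getD_foldl_ite_modify2 (c : Int → Bool) (i k : Int) :
    ∀ (js : List Int) (d : PySem.Dict Int (List Int)), i ∉ js → js.Nodup →
      ((js.foldl (fun d j => if c j then (d.modify i [] (· ++ [j])).modify j [] (· ++ [i]) else d) d).getD k []) =
        d.getD k [] ++ (if k = i then js.filter c else if k ∈ js ∧ c k then [i] else []) := by
  intro js
  induction js with
  | nil => intro d _ _; by_cases h : k = i <;> simp [h]
  | cons j js ih =>
    intro d hi hnd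
    have hij : i ≠ j := by intro h; exact hi (h ▸ List.mem_cons_self)
    have hi' : i ∉ js := fun h => hi (List.mem_cons_of_mem _ h)
    have hjs : j ∉ js := (List.nodup_cons.mp hnd).1
    have hnd' : js.Nodup := (List.nodup_cons.mp hnd).2
    simp only [List.foldl_cons, List.filter_cons]
    by_cases hc : c j
    · rw [ih _ hi' hnd', if_pos hc]
      have hgd : ∀ k' : Int,
          (((d.modify i [] (· ++ [j])).modify j [] (· ++ [i])).getD k' []) =
            if k' = j then d.getD j [] ++ [i] else if k' = i then d.getD i [] ++ [j] else d.getD k' [] := by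
        intro k'
        rw [PySem.Dict.getD_modify, PySem.Dict.getD_modify, PySem.Dict.getD_modify]
        by_cases h1 : k' = j
        · simp [h1, hij.symm]
        · simp [h1]
      rw [hgd]
      by_cases hki : k = i
      · subst hki
        simp [hij, hc, List.append_assoc]
      · by_cases hkj : k = j
        · subst hkj
          simp [hki, hc, hjs]
        · simp only [if_neg hki, if_neg hkj]
          have : (k ∈ j :: js ∧ c k = true) ↔ (k ∈ js ∧ c k = true) := by
            constructor
            · rintro ⟨hm, hck⟩
              exact ⟨(List.mem_cons.mp hm).resolve_left hkj, hck⟩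
            · rintro ⟨hm, hck⟩; exact ⟨List.mem_cons_of_mem _ hm, hck⟩
          by_cases hmem : k ∈ js ∧ c k = true
          · rw [if_pos hmem, if_pos (this.mpr hmem)]
          · rw [if_neg hmem, if_neg (fun h => hmem (this.mp h))]
    · simp only [Bool.not_eq_true] at hc
      rw [if_neg (by simp [hc]), ih _ hi' hnd']
      by_cases hki : k = i
      · simp [hki, hc]
      · simp only [if_neg hki]
        by_cases hkj : k = j
        · subst hkj; simp [hc]
        · have : (k ∈ j :: js ∧ c k = true) ↔ (k ∈ js ∧ c k = true) := by
            constructor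
            · rintro ⟨hm, hck⟩
              exact ⟨(List.mem_cons.mp hm).resolve_left hkj, hck⟩
            · rintro ⟨hm, hck⟩; exact ⟨List.mem_cons_of_mem _ hm, hck⟩
          by_cases hmem : k ∈ js ∧ c k = true
          · rw [if_pos hmem, if_pos (this.mpr hmem)]
          · rw [if_neg hmem, if_neg (fun h => hmem (this.mp h))]

theorem keys_foldl_ite_modify2 (c : Int → Bool) (i : Int) :
    ∀ (js : List Int) (d : PySem.Dict Int (List Int)), d.contains i = true →
      (∀ j ∈ js, d.contains j = true) →
      ((js.foldl (fun d j => if c j then (d.modify i [] (· ++ [j])).modify j [] (· ++ [i]) else d) d).keys) = d.keys := by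
  intro js
  induction js with
  | nil => intro d _ _; simp
  | cons j js ih =>
    intro d hdi hdj
    simp only [List.foldl_cons]
    have hj : d.contains j = true := hdj j List.mem_cons_self
    by_cases hc : c j
    · rw [if_pos hc, ih]
      · rw [PySem.Dict.keys_modify,
          PySem.Dict.keys_insert_of_contains _ _ (by rw [PySem.Dict.contains_modify]; simp [hj]),
          PySem.Dict.keys_modify, PySem.Dict.keys_insert_of_contains _ _ hdi]
      · rw [PySem.Dict.contains_modify, PySem.Dict.contains_modify]; simp [hdi]
      · intro x hx
        rw [PySem.Dict.contains_modify, PySem.Dict.contains_modify]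
        simp [hdj x (List.mem_cons_of_mem _ hx)]
    · rw [if_neg (by simp_all), ih _ hdi (fun x hx => hdj x (List.mem_cons_of_mem _ hx))]


-- ===== A-side: keys and values of A's dict =====
theorem keysA (pos : List (List Int)) (vf : Int) :
    ∀ (l : List (List Int)) (s : Int) (d : PySem.Dict Int (List Int)),
      (∀ x ∈ d.keys, x < s) →
      ((PySem.List.enumerate l s).foldl
          (fun d ip => pvAinner pos vf ip.1 ip.2 (d.insert ip.1 [])) d).keys
        = d.keys ++ (PySem.List.enumerate l s).map (·.1) := by
  intro l
  induction l with
  | nil => intro s d _; simp [PySem.List.enumerate]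
  | cons x xs ih =>
    intro s d hd
    rw [PySem.List.enumerate_cons]
    simp only [List.foldl_cons, List.map_cons]
    have hcs : d.contains s = false := by
      rw [PySem.Dict.contains_eq_decide_mem_keys]
      simp only [decide_eq_false_iff_not]
      intro hmem; exact absurd (hd s hmem) (by omega)
    have hk1 : (pvAinner pos vf s x (d.insert s [])).keys = d.keys ++ [s] := by
      unfold pvAinner
      rw [keys_foldl_ite_modify _ _ _ _ _ (PySem.Dict.contains_insert_self _ _ _),
        PySem.Dict.keys_insert_of_not_contains _ _ hcs]
    rw [ih (s + 1) _ (by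
      intro y hy
      rw [hk1] at hy
      rcases List.mem_append.mp hy with h | h
      · have := hd y h; omega
      · simp at h; omega)]
    rw [hk1, List.append_assoc]
    rfl

theorem getDA (pos : List (List Int)) (vf : Int) :
    ∀ (l : List (List Int)) (s : Int) (d : PySem.Dict Int (List Int)) (k : Int),
      (∀ x ∈ d.keys, x < s) →
      ((PySem.List.enumerate l s).foldl
          (fun d ip => pvAinner pos vf ip.1 ip.2 (d.insert ip.1 [])) d).getD k []
        = if s ≤ k ∧ k < s + l.length then
            ((PySem.List.enumerate pos 0).filter
              (pvAcond vf (l.getD (k - s).toNat []) k)).map (·.1)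
          else d.getD k [] := by
  intro l
  induction l with
  | nil =>
    intro s d k _
    rw [if_neg (by intro hcon; simp only [List.length_nil, Nat.cast_zero, add_zero] at hcon; omega)]
    simp [PySem.List.enumerate]
  | cons x xs ih =>
    intro s d k hd
    rw [PySem.List.enumerate_cons]
    simp only [List.foldl_cons]
    have hcs : d.contains s = false := by
      rw [PySem.Dict.contains_eq_decide_mem_keys]
      simp only [decide_eq_false_iff_not]
      intro hmem; exact absurd (hd s hmem) (by omega)
    have hk1 : (pvAinner pos vf s x (d.insert s [])).keys = d.keys ++ [s] := by
      unfold pvAinner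
      rw [keys_foldl_ite_modify _ _ _ _ _ (PySem.Dict.contains_insert_self _ _ _),
        PySem.Dict.keys_insert_of_not_contains _ _ hcs]
    have hbound : ∀ y ∈ (pvAinner pos vf s x (d.insert s [])).keys, y < s + 1 := by
      intro y hy
      rw [hk1] at hy
      rcases List.mem_append.mp hy with h | h
      · have := hd y h; omega
      · simp at h; omega
    rw [ih (s + 1) _ k hbound]
    have hstep : ∀ k' : Int, (pvAinner pos vf s x (d.insert s [])).getD k' []
        = if k' = s then ((PySem.List.enumerate pos 0).filter (pvAcond vf x s)).map (·.1)
          else d.getD k' [] := by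
      intro k'
      unfold pvAinner
      rw [getD_foldl_ite_modify]
      by_cases h : k' = s
      · rw [if_pos h, if_pos h, PySem.Dict.getD_insert, if_pos rfl, List.nil_append]
      · rw [if_neg h, if_neg h, PySem.Dict.getD_insert, if_neg h]
    by_cases h1 : s + 1 ≤ k ∧ k < s + 1 + xs.length
    · rw [if_pos h1, if_pos (by simp only [List.length_cons]; omega)]
      have : (k - s).toNat = (k - (s + 1)).toNat + 1 := by omega
      rw [this, List.getD_cons_succ]
    · rw [if_neg h1, hstep k]
      by_cases h2 : k = s
      · have hpos : s ≤ k ∧ k < s + ((x :: xs).length : Int) := by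
          simp only [List.length_cons]
          push_cast
          omega
        rw [if_pos h2, if_pos hpos]
        simp [h2]
      · rw [if_neg h2, if_neg (by simp only [List.length_cons]; push_cast; omega)]

-- ===== B-side: the contribution of outer iteration i to bucket k =====
def pvContrib (pos : List (List Int)) (vf n k i : Int) : List Int :=
  if k = i then
    (PySem.List.pyRange (i + 1) n 1).filter
      (fun j => pvBcond vf (pvX pos i) (pvRow pos i) (pvRow pos j))
  else if k ∈ PySem.List.pyRange (i + 1) n 1 ∧
          pvBcond vf (pvX pos i) (pvRow pos i) (pvRow pos k) = true then [i]
  else []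

theorem getDB (pos : List (List Int)) (vf n : Int) :
    ∀ (is : List Int) (d : PySem.Dict Int (List Int)) (k : Int),
      ((is.foldl
          (fun d i => pvBinner pos vf n i (PySem.List.pyGetD pos i [])
            (PySem.List.pyGetD (PySem.List.pyGetD pos i []) 0 0) d) d).getD k [])
        = d.getD k [] ++ is.flatMap (pvContrib pos vf n k) := by
  intro is
  induction is with
  | nil => intro d k; simp
  | cons i is ih =>
    intro d k
    simp only [List.foldl_cons, List.flatMap_cons]
    rw [ih]
    have hstep : (pvBinner pos vf n i (PySem.List.pyGetD pos i [])
        (PySem.List.pyGetD (PySem.List.pyGetD pos i []) 0 0) d).getD k []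
        = d.getD k [] ++ pvContrib pos vf n k i := by
      unfold pvBinner pvContrib
      rw [getD_foldl_ite_modify2 _ i k _ _
        (by intro h; have := PySem.List.mem_pyRange_one.mp h; omega)
        (PySem.List.nodup_pyRange_one _ _)]
      rfl
    rw [hstep, List.append_assoc]

theorem keysB (pos : List (List Int)) (vf n : Int) :
    ∀ (is : List Int) (d : PySem.Dict Int (List Int)),
      (∀ x : Int, 0 ≤ x → x < n → d.contains x = true) →
      (∀ i ∈ is, 0 ≤ i ∧ i < n) →
      ((is.foldl
          (fun d i => pvBinner pos vf n i (PySem.List.pyGetD pos i [])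
            (PySem.List.pyGetD (PySem.List.pyGetD pos i []) 0 0) d) d).keys) = d.keys := by
  intro is
  induction is with
  | nil => intro d _ _; simp
  | cons i is ih =>
    intro d hdc his
    simp only [List.foldl_cons]
    have hi := his i List.mem_cons_self
    have hstep : (pvBinner pos vf n i (PySem.List.pyGetD pos i [])
        (PySem.List.pyGetD (PySem.List.pyGetD pos i []) 0 0) d).keys = d.keys := by
      unfold pvBinner
      exact keys_foldl_ite_modify2 _ i _ _ (hdc i hi.1 hi.2)
        (fun j hj => by
          have := PySem.List.mem_pyRange_one.mp hj
          exact hdc j (by omega) (by omega))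
    rw [ih _ (fun x hx1 hx2 => by
        rw [PySem.Dict.contains_eq_decide_mem_keys, hstep,
          ← PySem.Dict.contains_eq_decide_mem_keys]
        exact hdc x hx1 hx2)
      (fun j hj => his j (List.mem_cons_of_mem _ hj)), hstep]

theorem flat_tail (pos : List (List Int)) (vf n k : Int) :
    ∀ (m : Nat) (a : Int), (n - a).toNat = m → k < a →
      (PySem.List.pyRange a n 1).flatMap (pvContrib pos vf n k) = [] := by
  intro m
  induction m with
  | zero =>
    intro a hm _
    rw [PySem.List.pyRange_one_eq_nil (by omega)]
    simp
  | succ m ih =>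
    intro a hm hk
    by_cases hab : a < n
    · rw [PySem.List.pyRange_one_cons hab]
      simp only [List.flatMap_cons]
      have hc : pvContrib pos vf n k a = [] := by
        unfold pvContrib
        rw [if_neg (by omega), if_neg (by
          rintro ⟨hmem, -⟩
          have := PySem.List.mem_pyRange_one.mp hmem
          omega)]
      rw [hc, ih (a + 1) (by omega) (by omega)]
      rfl
    · rw [PySem.List.pyRange_one_eq_nil (by omega)]; simp

theorem pvBcond_eq_near (pos : List (List Int)) (vf i j : Int) :
    pvBcond vf (pvX pos i) (pvRow pos i) (pvRow pos j) = pvNear pos vf i j := rfl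

theorem flat_main (pos : List (List Int)) (vf n k : Int) (_hk0 : 0 ≤ k) (hkn : k < n) :
    ∀ (m : Nat) (a : Int), (k - a).toNat = m → 0 ≤ a → a ≤ k →
      (PySem.List.pyRange a n 1).flatMap (pvContrib pos vf n k)
        = (PySem.List.pyRange a n 1).filter (fun j => pvNear pos vf k j && j != k) := by
  intro m
  induction m with
  | zero =>
    intro a hm _ hak
    have hak' : a = k := by omega
    rw [hak']
    rw [PySem.List.pyRange_one_cons (by omega)]
    simp only [List.flatMap_cons, List.filter_cons]
    have hhead : (pvNear pos vf k k && (k != k)) = false := by simp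
    rw [hhead]
    have hc : pvContrib pos vf n k k = (PySem.List.pyRange (k + 1) n 1).filter
        (fun j => pvBcond vf (pvX pos k) (pvRow pos k) (pvRow pos j)) := by
      unfold pvContrib; rw [if_pos rfl]
    rw [hc, flat_tail pos vf n k (n - (k + 1)).toNat (k + 1) rfl (by omega), List.append_nil]
    apply List.filter_congr
    intro j hj
    have hjk : j ≠ k := by have := PySem.List.mem_pyRange_one.mp hj; omega
    rw [pvBcond_eq_near, pvNear_comm]
    simp [hjk]
  | succ m ih =>
    intro a hm ha0 hak
    have hltk : a < k := by omega
    rw [PySem.List.pyRange_one_cons (by omega)]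
    simp only [List.flatMap_cons, List.filter_cons]
    have hmem : k ∈ PySem.List.pyRange (a + 1) n 1 :=
      PySem.List.mem_pyRange_one.mpr ⟨by omega, hkn⟩
    have hc : pvContrib pos vf n k a
        = if pvNear pos vf k a then [a] else [] := by
      unfold pvContrib
      rw [if_neg (by omega)]
      rw [pvBcond_eq_near, pvNear_comm]
      by_cases h : pvNear pos vf k a
      · rw [if_pos ⟨hmem, h⟩, if_pos h]
      · rw [if_neg (by rintro ⟨-, hh⟩; exact h hh), if_neg h]
    have hhead : (pvNear pos vf k a && (a != k)) = pvNear pos vf k a := by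
      have : (a != k) = true := by simp [hltk.ne]
      rw [this, Bool.and_true]
    rw [hc, hhead, ih (a + 1) (by omega) (by omega) (by omega)]
    by_cases h : pvNear pos vf k a
    · rw [if_pos h, h]; rfl
    · rw [if_neg h]
      simp only [Bool.not_eq_true] at h
      rw [h]
      rfl


-- ===== assembly: both ports compute (k, pvVal k) for k in range(n) =====
theorem pvAcond_eq (pos : List (List Int)) (vf k j : Int) :
    pvAcond vf (pvRow pos k) k (j, pvRow pos j) = (pvNear pos vf k j && j != k) := by
  rw [Bool.eq_iff_iff]
  simp [pvAcond, pvNear, pvX, pvY, and_assoc]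

theorem itemsA_eq (pos : List (List Int)) (vf : Int) :
    find_neighbor_id pos vf
      = (PySem.List.pyRange 0 (pos.length : Int) 1).map (fun k => (k, pvVal pos vf k)) := by
  unfold find_neighbor_id
  have hkeys : ((PySem.List.enumerate pos 0).foldl
      (fun d ip => pvAinner pos vf ip.1 ip.2 (d.insert ip.1 []))
      PySem.Dict.empty).keys = PySem.List.pyRange 0 (pos.length : Int) 1 := by
    rw [keysA pos vf pos 0 PySem.Dict.empty (by simp [PySem.Dict.keys_empty])]
    rw [PySem.Dict.keys_empty, List.nil_append, PySem.List.map_fst_enumerate]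
    norm_num
  have hnd : ((PySem.List.enumerate pos 0).foldl
      (fun d ip => pvAinner pos vf ip.1 ip.2 (d.insert ip.1 []))
      PySem.Dict.empty).keys.Nodup := by
    rw [hkeys]; exact PySem.List.nodup_pyRange_one _ _
  rw [PySem.Dict.items_eq_map_keys _ hnd [], hkeys]
  apply List.map_congr_left
  intro k hk
  have hkb := PySem.List.mem_pyRange_one.mp hk
  have hklen : k.toNat < pos.length := by omega
  refine Prod.ext rfl ?_
  rw [getDA pos vf pos 0 PySem.Dict.empty k (by simp [PySem.Dict.keys_empty])]
  rw [if_pos (by constructor <;> omega)]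
  have hrow : pos.getD (k - 0).toNat [] = pvRow pos k := by
    rw [pvRow, PySem.List.pyGetD_of_nonneg _ _ (by omega), sub_zero]
  rw [hrow]
  show _ = pvVal pos vf k
  rw [pvVal, PySem.List.enumerate_eq_map_pyRange pos []]
  rw [List.filter_map, List.map_map]
  have h1 : ((·.1) ∘ fun j => (j, PySem.List.pyGetD pos j [])) = fun j : Int => j := rfl
  rw [h1, List.map_id']
  simp only [PySem.List.len_eq]
  apply List.filter_congr
  intro j hj
  show pvAcond vf (pvRow pos k) k (j, pvRow pos j) = _
  exact pvAcond_eq pos vf k j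

theorem itemsB_eq (pos : List (List Int)) (vf : Int) :
    find_neighbor_id_alt pos vf
      = (PySem.List.pyRange 0 (pos.length : Int) 1).map (fun k => (k, pvVal pos vf k)) := by
  unfold find_neighbor_id_alt
  simp only []
  set n : Int := (pos.length : Int) with hn
  have hd0items : ((PySem.List.pyRange 0 n 1).foldl
      (fun d i => d.insert i []) (PySem.Dict.empty : PySem.Dict Int (List Int))).items
      = (PySem.List.pyRange 0 n 1).map (fun i => (i, ([] : List Int))) := by
    rw [PySem.Dict.items_foldl_insert_fresh (PySem.List.pyRange 0 n 1)
      (fun a => a) (fun _ => ([] : List Int)) PySem.Dict.empty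
      (fun a _ => PySem.Dict.contains_empty a)
      (by rw [List.map_id']; exact PySem.List.nodup_pyRange_one _ _)]
    simp [PySem.Dict.empty]
  have hd0keys : ((PySem.List.pyRange 0 n 1).foldl
      (fun d i => d.insert i []) (PySem.Dict.empty : PySem.Dict Int (List Int))).keys
      = PySem.List.pyRange 0 n 1 := by
    show ((PySem.List.pyRange 0 n 1).foldl
      (fun d i => d.insert i []) (PySem.Dict.empty : PySem.Dict Int (List Int))).items.map (·.1)
      = PySem.List.pyRange 0 n 1
    rw [hd0items, List.map_map]
    exact List.map_id' _
  have hd0c : ∀ x : Int, 0 ≤ x → x < n →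
      ((PySem.List.pyRange 0 n 1).foldl
        (fun d i => d.insert i []) (PySem.Dict.empty : PySem.Dict Int (List Int))).contains x = true := by
    intro x h1 h2
    rw [PySem.Dict.contains_eq_decide_mem_keys, hd0keys]
    simp [PySem.List.mem_pyRange_one]
    omega
  have hkeys : ((PySem.List.pyRange 0 n 1).foldl
      (fun d i => pvBinner pos vf n i (PySem.List.pyGetD pos i [])
        (PySem.List.pyGetD (PySem.List.pyGetD pos i []) 0 0) d)
      ((PySem.List.pyRange 0 n 1).foldl (fun d i => d.insert i []) PySem.Dict.empty)).keys
      = PySem.List.pyRange 0 n 1 := by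
    rw [keysB pos vf n _ _ hd0c
      (fun i hi => by have := PySem.List.mem_pyRange_one.mp hi; omega), hd0keys]
  have hnd : ((PySem.List.pyRange 0 n 1).foldl
      (fun d i => pvBinner pos vf n i (PySem.List.pyGetD pos i [])
        (PySem.List.pyGetD (PySem.List.pyGetD pos i []) 0 0) d)
      ((PySem.List.pyRange 0 n 1).foldl (fun d i => d.insert i []) PySem.Dict.empty)).keys.Nodup := by
    rw [hkeys]; exact PySem.List.nodup_pyRange_one _ _
  rw [PySem.Dict.items_eq_map_keys _ hnd [], hkeys]
  apply List.map_congr_left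
  intro k hk
  have hkb := PySem.List.mem_pyRange_one.mp hk
  refine Prod.ext rfl ?_
  rw [getDB pos vf n _ _ k]
  have hd0getD : ((PySem.List.pyRange 0 n 1).foldl
      (fun d i => d.insert i []) (PySem.Dict.empty : PySem.Dict Int (List Int))).getD k [] = [] := by
    apply PySem.Dict.getD_of_mem_items _ _ (by rw [hd0keys]; exact PySem.List.nodup_pyRange_one _ _)
    rw [hd0items]
    exact List.mem_map.mpr ⟨k, hk, rfl⟩
  rw [hd0getD, List.nil_append]
  rw [flat_main pos vf n k hkb.1 hkb.2 (k - 0).toNat 0 rfl (by omega) (by omega)]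
  rfl

-- ===== VERDICT (by name: the statement is the Claim_ definition above) =====
theorem find_neighbor_id_spec : Claim_equal_find_neighbor_id := by
  intro pos view_field _ _
  unfold Spec_find_neighbor_id
  rw [itemsA_eq, itemsB_eq]
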